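-- pv_equiv track=rewrite | github.com/MrBrantCode/unitest_baseline | mut_generate/mist_train_cf/cf_61846/solution.py | complex_bracket_sequence
-- ===== SOURCE A (Python) =====
-- def complex_bracket_sequence(arr, n):
--     # Define matching pairs
--     pairs = {')': '(', ']': '[', '}': '{', '>': '<'}
--
--     # Initialize counts for each type of bracket
--     counts = {'()': 0, '[]': 0, '{}': 0, '<>': 0}
--
--     # Try to form sequences from strings in arr
--     for s in arr:
--         stack = []
--         for ch in s:
--             if ch in pairs:
--                 if stack and stack[-1] == pairs[ch]:
--                     stack.pop()
--                     counts[pairs[ch]+ch] += 1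
--                 else:
--                     return 'No'
--             else:
--                 stack.append(ch)
--         if stack:
--             return 'No'
--
--     # Check if any count is less than n
--     for value in counts.values():
--         if value < n:
--             return 'No'
--
--     # If all counts are at least n, return 'Yes'
--     return 'Yes'
-- ===== SOURCE B (Python) =====
-- def complex_bracket_sequence(arr, n):
--     # Iterative reduction: repeatedly delete adjacent matched pairs, counting each
--     # deletion per pair type; a string is valid iff it reduces to the empty string.
--     paren = square = curly = angle = 0
--     for s in arr:
--         t = list(s)
--         changed = True
--         while changed:
--             changed = False
--             i = 0
--             while i + 1 < len(t):
--                 a, b = t[i], t[i + 1]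
--                 if a == '(' and b == ')':
--                     paren += 1
--                 elif a == '[' and b == ']':
--                     square += 1
--                 elif a == '{' and b == '}':
--                     curly += 1
--                 elif a == '<' and b == '>':
--                     angle += 1
--                 else:
--                     i += 1
--                     continue
--                 del t[i:i + 2]
--                 changed = True
--         if t:
--             return 'No'
--     if paren < n or square < n or curly < n or angle < n:
--         return 'No'
--     return 'Yes'
-- ===== Notes on version B (the rewrite author's own statement) =====
-- stated objective: alternative
-- what changed: Replaces the per-character stack pass with an iterative rewrite system that repeatedly deletes any adjacent matched pair ('()','[]','{}','<>') from the string, counting deletions per type, and declares a string valid iff it reduces to the empty string; the dict-based counters become four plain integer counters.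
import Mathlib
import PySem

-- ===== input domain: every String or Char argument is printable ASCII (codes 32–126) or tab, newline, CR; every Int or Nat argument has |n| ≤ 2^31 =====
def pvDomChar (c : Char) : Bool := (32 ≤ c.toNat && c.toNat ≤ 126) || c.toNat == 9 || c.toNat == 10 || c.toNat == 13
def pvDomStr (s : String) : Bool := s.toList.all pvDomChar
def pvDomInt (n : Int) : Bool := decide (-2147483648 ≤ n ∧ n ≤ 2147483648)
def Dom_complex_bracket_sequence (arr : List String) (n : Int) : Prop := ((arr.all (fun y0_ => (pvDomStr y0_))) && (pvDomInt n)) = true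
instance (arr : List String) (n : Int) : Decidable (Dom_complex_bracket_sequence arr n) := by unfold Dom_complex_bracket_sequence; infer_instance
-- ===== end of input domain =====

-- B replaces A's single stack pass per string by repeated deletion of adjacent
-- matched pairs (reduce-to-empty validity) with four plain integer counters;
-- an alternative algorithm, proved to return the same string on every input.

-- ===== PORT A =====

-- pairs = {')': '(', ']': '[', '}': '{', '>': '<'}  (dict of 1-char strings, ported as chars)
def pvPairsA : PySem.Dict Char Char :=
  PySem.Dict.ofList [(')', '('), (']', '['), ('}', '{'), ('>', '<')]

-- counts = {'()': 0, '[]': 0, '{}': 0, '<>': 0}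
def pvCounts0A : PySem.Dict String Int :=
  PySem.Dict.ofList [("()", 0), ("[]", 0), ("{}", 0), ("<>", 0)]

-- inner `for ch in s` loop; `none` models the early `return 'No'`;
-- the stack is kept head-first (head = Python stack[-1]).
def pvInnerA : List Char → List Char → PySem.Dict String Int →
    Option (List Char × PySem.Dict String Int)
  | [], stack, counts => some (stack, counts)
  | ch :: rest, stack, counts =>
    if pvPairsA.contains ch then
      match stack with
      | top :: stack' =>
        if top = pvPairsA.getD ch ' ' then
          -- counts[pairs[ch]+ch] += 1
          pvInnerA rest stack'
            (counts.modify (String.ofList [pvPairsA.getD ch ' ', ch]) 0 (· + 1))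
        else none
      | [] => none
    else
      pvInnerA rest (ch :: stack) counts

-- outer `for s in arr` loop
def pvOuterA : List String → PySem.Dict String Int → Option (PySem.Dict String Int)
  | [], counts => some counts
  | s :: rest, counts =>
    match pvInnerA s.toList [] counts with
    | none => none
    | some (stack, counts') => if stack = [] then pvOuterA rest counts' else none

-- final `for value in counts.values(): if value < n: return 'No'`
def pvFinalA (vals : List Int) (n : Int) : String :=
  match vals with
  | [] => "Yes"
  | v :: rest => if v < n then "No" else pvFinalA rest n

def complex_bracket_sequence (arr : List String) (n : Int) : String :=
  match pvOuterA arr pvCounts0A with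
  | none => "No"
  | some counts => pvFinalA counts.values n

-- ===== PORT B =====

-- one inner `while i + 1 < len(t)` scan with counters (paren, square, curly, angle);
-- staying at index i after `del t[i:i+2]` = recursing on `rest`,
-- `i += 1` = keeping `a` and recursing on `b :: rest`.
def pvScanB : List Char → Int × Int × Int × Int →
    List Char × (Int × Int × Int × Int) × Bool
  | a :: b :: rest, c =>
    if a = '(' ∧ b = ')' then
      ((pvScanB rest (c.1 + 1, c.2.1, c.2.2.1, c.2.2.2)).1,
       (pvScanB rest (c.1 + 1, c.2.1, c.2.2.1, c.2.2.2)).2.1, true)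
    else if a = '[' ∧ b = ']' then
      ((pvScanB rest (c.1, c.2.1 + 1, c.2.2.1, c.2.2.2)).1,
       (pvScanB rest (c.1, c.2.1 + 1, c.2.2.1, c.2.2.2)).2.1, true)
    else if a = '{' ∧ b = '}' then
      ((pvScanB rest (c.1, c.2.1, c.2.2.1 + 1, c.2.2.2)).1,
       (pvScanB rest (c.1, c.2.1, c.2.2.1 + 1, c.2.2.2)).2.1, true)
    else if a = '<' ∧ b = '>' then
      ((pvScanB rest (c.1, c.2.1, c.2.2.1, c.2.2.2 + 1)).1,
       (pvScanB rest (c.1, c.2.1, c.2.2.1, c.2.2.2 + 1)).2.1, true)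
    else
      (a :: (pvScanB (b :: rest) c).1, (pvScanB (b :: rest) c).2.1,
       (pvScanB (b :: rest) c).2.2)
  | t, c => (t, c, false)

theorem pvScanB_length_le : ∀ (t : List Char) (c : Int × Int × Int × Int),
    (pvScanB t c).1.length ≤ t.length := by
  intro t c
  fun_induction pvScanB t c <;> simp_all <;> omega

-- the scan strictly shortens the list whenever it reports `changed = true`
-- (needed for the termination of the `while changed:` loop below)
theorem pvScanB_shorter : ∀ (t : List Char) (c : Int × Int × Int × Int),
    (pvScanB t c).2.2 = true → (pvScanB t c).1.length < t.length := by
  intro t c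
  fun_induction pvScanB t c with
  | case1 a b rest c hab ih => have := pvScanB_length_le rest (c.1 + 1, c.2.1, c.2.2.1, c.2.2.2); intro _; simp_all; omega
  | case2 a b rest c h1 hab ih => have := pvScanB_length_le rest (c.1, c.2.1 + 1, c.2.2.1, c.2.2.2); intro _; simp_all; omega
  | case3 a b rest c h1 h2 hab ih => have := pvScanB_length_le rest (c.1, c.2.1, c.2.2.1 + 1, c.2.2.2); intro _; simp_all; omega
  | case4 a b rest c h1 h2 h3 hab ih => have := pvScanB_length_le rest (c.1, c.2.1, c.2.2.1, c.2.2.2 + 1); intro _; simp_all; omega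
  | case5 a b rest c h1 h2 h3 h4 ih => intro h; simp_all
  | case6 t c h => intro h'; simp_all

-- `while changed:` loop
def pvReduceB (t : List Char) (c : Int × Int × Int × Int) :
    List Char × (Int × Int × Int × Int) :=
  if h : (pvScanB t c).2.2 then pvReduceB (pvScanB t c).1 (pvScanB t c).2.1
  else ((pvScanB t c).1, (pvScanB t c).2.1)
termination_by t.length
decreasing_by exact pvScanB_shorter t c h

-- `for s in arr` loop; `none` models the early `return 'No'`
def pvOuterB : List String → Int × Int × Int × Int → Option (Int × Int × Int × Int)
  | [], c => some c
  | s :: rest, c =>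
    if (pvReduceB s.toList c).1 = [] then pvOuterB rest (pvReduceB s.toList c).2 else none

def complex_bracket_sequence_alt (arr : List String) (n : Int) : String :=
  match pvOuterB arr (0, 0, 0, 0) with
  | none => "No"
  | some (p, q, r, t) =>
    if p < n ∨ q < n ∨ r < n ∨ t < n then "No" else "Yes"

-- ===== PRECONDITION & SPEC =====
def Spec_complex_bracket_sequence (arr : List String) (n : Int) (out : String) : Prop := out = complex_bracket_sequence_alt arr n
instance (arr : List String) (n : Int) (out : String) : Decidable (Spec_complex_bracket_sequence arr n out) := by unfold Spec_complex_bracket_sequence; infer_instance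

-- ===== CLAIM (what is proved, stated in full; the proofs are below) =====
def Claim_equal_complex_bracket_sequence : Prop := ∀ (arr : List String) (n : Int), Dom_complex_bracket_sequence arr n → Spec_complex_bracket_sequence arr n (complex_bracket_sequence arr n)

-- ===== LEMMAS AND PROOFS =====

-- componentwise addition of the four counters
def pvCAdd (x y : Int × Int × Int × Int) : Int × Int × Int × Int :=
  (x.1 + y.1, x.2.1 + y.2.1, x.2.2.1 + y.2.2.1, x.2.2.2 + y.2.2.2)

-- the `pairs` lookup as a plain function
def pvPOf (ch : Char) : Option Char :=
  if ch = ')' then some '(' else if ch = ']' then some '[' else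
  if ch = '}' then some '{' else if ch = '>' then some '<' else none

-- counter unit vector of a closing bracket
def pvEOf (ch : Char) : Int × Int × Int × Int :=
  if ch = ')' then (1, 0, 0, 0) else if ch = ']' then (0, 1, 0, 0) else
  if ch = '}' then (0, 0, 1, 0) else (0, 0, 0, 1)

-- A's stack pass, counts kept as a delta 4-tuple (proof-side model)
def pvRun : List Char → List Char → Option (List Char × (Int × Int × Int × Int))
  | [], st => some (st, (0, 0, 0, 0))
  | ch :: rest, st =>
    match pvPOf ch with
    | some p =>
      match st with
      | top :: st' =>
        if top = p then
          (pvRun rest st').map (fun q => (q.1, pvCAdd (pvEOf ch) q.2))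
        else none
      | [] => none
    | none => pvRun rest (ch :: st)

def pvIsPairP (a b : Char) : Prop :=
  (a = '(' ∧ b = ')') ∨ (a = '[' ∧ b = ']') ∨ (a = '{' ∧ b = '}') ∨ (a = '<' ∧ b = '>')

def pvNoAdj : List Char → Prop
  | a :: b :: rest => ¬ pvIsPairP a b ∧ pvNoAdj (b :: rest)
  | _ => True

-- the counts dict of A always has this literal shape
def mkC (a b c d : Int) : PySem.Dict String Int :=
  PySem.Dict.ofList [("()", a), ("[]", b), ("{}", c), ("<>", d)]

theorem mkC_mod_p (a b c d : Int) : (mkC a b c d).modify "()" 0 (· + 1) = mkC (a+1) b c d := rfl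
theorem mkC_mod_s (a b c d : Int) : (mkC a b c d).modify "[]" 0 (· + 1) = mkC a (b+1) c d := rfl
theorem mkC_mod_c (a b c d : Int) : (mkC a b c d).modify "{}" 0 (· + 1) = mkC a b (c+1) d := rfl
theorem mkC_mod_a (a b c d : Int) : (mkC a b c d).modify "<>" 0 (· + 1) = mkC a b c (d+1) := rfl

theorem pvPairsA_contains_eq (ch : Char) : pvPairsA.contains ch = (pvPOf ch).isSome := by
  by_cases h1 : ch = ')'
  · subst h1; rfl
  · by_cases h2 : ch = ']'
    · subst h2; rfl
    · by_cases h3 : ch = '}'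
      · subst h3; rfl
      · by_cases h4 : ch = '>'
        · subst h4; rfl
        · have hk : pvPairsA.keys = [')', ']', '}', '>'] := rfl
          rw [PySem.Dict.contains_eq_decide_mem_keys, hk]
          simp [pvPOf, h1, h2, h3, h4]

theorem mkC_congr (x y z w x' y' z' w' : Int) (hx : x = x') (hy : y = y')
    (hz : z = z') (hw : w = w') : mkC x y z w = mkC x' y' z' w' := by
  subst hx; subst hy; subst hz; subst hw; rfl

-- A's inner loop is pvRun plus bookkeeping on the literal dict
theorem bridgeA : ∀ (s st : List Char) (a b c d : Int),
    pvInnerA s st (mkC a b c d) =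
      (pvRun s st).map
        (fun q => (q.1, mkC (a + q.2.1) (b + q.2.2.1) (c + q.2.2.2.1) (d + q.2.2.2.2))) := by
  intro s
  induction s with
  | nil => intro st a b c d; simp [pvInnerA, pvRun]
  | cons ch rest ih =>
    intro st a b c d
    cases hp : pvPOf ch with
    | none =>
      have hc : pvPairsA.contains ch = false := by rw [pvPairsA_contains_eq, hp]; rfl
      rw [show pvInnerA (ch :: rest) st (mkC a b c d) =
            pvInnerA rest (ch :: st) (mkC a b c d) from by simp [pvInnerA, hc],
          show pvRun (ch :: rest) st = pvRun rest (ch :: st) from by simp [pvRun, hp]]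
      exact ih (ch :: st) a b c d
    | some p =>
      have hcase : (ch = ')' ∧ p = '(') ∨ (ch = ']' ∧ p = '[') ∨
          (ch = '}' ∧ p = '{') ∨ (ch = '>' ∧ p = '<') := by
        unfold pvPOf at hp
        split_ifs at hp <;> simp_all [eq_comm]
      have hc : pvPairsA.contains ch = true := by rw [pvPairsA_contains_eq, hp]; rfl
      have hg : pvPairsA.getD ch ' ' = p := by
        rcases hcase with ⟨h1, h2⟩ | ⟨h1, h2⟩ | ⟨h1, h2⟩ | ⟨h1, h2⟩ <;> subst h1 <;> subst h2 <;> rfl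
      cases st with
      | nil => simp [pvInnerA, hc, pvRun, hp]
      | cons top st' =>
        by_cases htp : top = p
        · have hmod : ∀ (a b c d : Int),
              (mkC a b c d).modify (String.ofList [p, ch]) 0 (· + 1) =
                mkC (a + (pvEOf ch).1) (b + (pvEOf ch).2.1)
                  (c + (pvEOf ch).2.2.1) (d + (pvEOf ch).2.2.2) := by
            rcases hcase with ⟨h1, h2⟩ | ⟨h1, h2⟩ | ⟨h1, h2⟩ | ⟨h1, h2⟩ <;>
              subst h1 <;> subst h2 <;> intro a b c d <;>
              simp [pvEOf] <;>
              first
                | exact mkC_mod_p a b c d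
                | exact mkC_mod_s a b c d
                | exact mkC_mod_c a b c d
                | exact mkC_mod_a a b c d
          rw [show pvInnerA (ch :: rest) (top :: st') (mkC a b c d) =
                pvInnerA rest st' ((mkC a b c d).modify (String.ofList [p, ch]) 0 (· + 1))
                from by simp [pvInnerA, hc, hg, htp],
              hmod a b c d, ih st' _ _ _ _,
              show pvRun (ch :: rest) (top :: st') =
                (pvRun rest st').map (fun q => (q.1, pvCAdd (pvEOf ch) q.2)) from by
                  simp [pvRun, hp, htp]]
          cases pvRun rest st' with
          | none => simp
          | some q =>
            simp only [Option.map_some]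
            refine congrArg some (Prod.ext rfl ?_)
            simp only [pvCAdd]
            exact mkC_congr _ _ _ _ _ _ _ _ (by omega) (by omega) (by omega) (by omega)
        · simp [pvInnerA, hc, hg, htp, pvRun, hp]

-- processing an adjacent matched pair adds its unit and leaves the stack alone
theorem run_pair (a b : Char) (hab : pvIsPairP a b) (v st : List Char) :
    pvRun (a :: b :: v) st = (pvRun v st).map (fun q => (q.1, pvCAdd (pvEOf b) q.2)) := by
  rcases hab with ⟨ha, hb⟩ | ⟨ha, hb⟩ | ⟨ha, hb⟩ | ⟨ha, hb⟩ <;> subst ha <;> subst hb <;>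
    simp [pvRun, pvPOf, pvEOf]

theorem cadd_assoc (x y z : Int × Int × Int × Int) :
    pvCAdd (pvCAdd x y) z = pvCAdd x (pvCAdd y z) := by
  simp [pvCAdd, Prod.ext_iff]; omega

theorem cadd_zero (x : Int × Int × Int × Int) : pvCAdd x (0, 0, 0, 0) = x := by
  simp [pvCAdd]

-- one scan pass preserves pvRun up to the counted deletions
theorem scan_run : ∀ (t : List Char) (c : Int × Int × Int × Int),
    ∃ δ, (pvScanB t c).2.1 = pvCAdd c δ ∧
      ∀ st, pvRun t st =
        (pvRun (pvScanB t c).1 st).map (fun q => (q.1, pvCAdd δ q.2)) := by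
  intro t c
  fun_induction pvScanB t c with
  | case1 a b rest c hab ih =>
    obtain ⟨ha, hb⟩ := hab; subst ha; subst hb
    obtain ⟨δ, hδ, hrun⟩ := ih
    refine ⟨pvCAdd (1, 0, 0, 0) δ, ?_, ?_⟩
    · rw [hδ]; simp [pvCAdd, Prod.ext_iff]; omega
    · intro st
      rw [run_pair _ _ (Or.inl ⟨rfl, rfl⟩), hrun st]
      cases pvRun (pvScanB rest (c.1 + 1, c.2.1, c.2.2.1, c.2.2.2)).1 st <;>
        simp [pvCAdd, pvEOf, Prod.ext_iff] <;> omega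
  | case2 a b rest c h1 hab ih =>
    obtain ⟨ha, hb⟩ := hab; subst ha; subst hb
    obtain ⟨δ, hδ, hrun⟩ := ih
    refine ⟨pvCAdd (0, 1, 0, 0) δ, ?_, ?_⟩
    · rw [hδ]; simp [pvCAdd, Prod.ext_iff]; omega
    · intro st
      rw [run_pair _ _ (Or.inr (Or.inl ⟨rfl, rfl⟩)), hrun st]
      cases pvRun (pvScanB rest (c.1, c.2.1 + 1, c.2.2.1, c.2.2.2)).1 st <;>
        simp [pvCAdd, pvEOf, Prod.ext_iff] <;> omega
  | case3 a b rest c h1 h2 hab ih =>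
    obtain ⟨ha, hb⟩ := hab; subst ha; subst hb
    obtain ⟨δ, hδ, hrun⟩ := ih
    refine ⟨pvCAdd (0, 0, 1, 0) δ, ?_, ?_⟩
    · rw [hδ]; simp [pvCAdd, Prod.ext_iff]; omega
    · intro st
      rw [run_pair _ _ (Or.inr (Or.inr (Or.inl ⟨rfl, rfl⟩))), hrun st]
      cases pvRun (pvScanB rest (c.1, c.2.1, c.2.2.1 + 1, c.2.2.2)).1 st <;>
        simp [pvCAdd, pvEOf, Prod.ext_iff] <;> omega
  | case4 a b rest c h1 h2 h3 hab ih =>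
    obtain ⟨ha, hb⟩ := hab; subst ha; subst hb
    obtain ⟨δ, hδ, hrun⟩ := ih
    refine ⟨pvCAdd (0, 0, 0, 1) δ, ?_, ?_⟩
    · rw [hδ]; simp [pvCAdd, Prod.ext_iff]; omega
    · intro st
      rw [run_pair _ _ (Or.inr (Or.inr (Or.inr ⟨rfl, rfl⟩))), hrun st]
      cases pvRun (pvScanB rest (c.1, c.2.1, c.2.2.1, c.2.2.2 + 1)).1 st <;>
        simp [pvCAdd, pvEOf, Prod.ext_iff] <;> omega
  | case5 a b rest c h1 h2 h3 h4 ih =>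
    obtain ⟨δ, hδ, hrun⟩ := ih
    refine ⟨δ, hδ, ?_⟩
    intro st
    cases hp : pvPOf a with
    | none =>
      rw [show pvRun (a :: b :: rest) st = pvRun (b :: rest) (a :: st) from by
            simp [pvRun, hp],
          show pvRun (a :: (pvScanB (b :: rest) c).1) st =
              pvRun (pvScanB (b :: rest) c).1 (a :: st) from by simp [pvRun, hp]]
      exact hrun (a :: st)
    | some p =>
      cases st with
      | nil => simp [pvRun, hp]
      | cons top st' =>
        by_cases htp : top = p
        · subst htp
          rw [show pvRun (a :: b :: rest) (top :: st') =
                (pvRun (b :: rest) st').map (fun q => (q.1, pvCAdd (pvEOf a) q.2)) from by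
                  simp [pvRun, hp],
              show pvRun (a :: (pvScanB (b :: rest) c).1) (top :: st') =
                (pvRun (pvScanB (b :: rest) c).1 st').map
                  (fun q => (q.1, pvCAdd (pvEOf a) q.2)) from by simp [pvRun, hp],
              hrun st']
          cases pvRun (pvScanB (b :: rest) c).1 st' <;>
            simp [pvCAdd, Prod.ext_iff] <;> omega
        · simp [pvRun, hp, htp]
  | case6 t c h =>
    refine ⟨(0, 0, 0, 0), by simp [pvCAdd], ?_⟩
    intro st
    cases pvRun t st <;> simp [pvCAdd]

theorem scan_false : ∀ (t : List Char) (c : Int × Int × Int × Int),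
    (pvScanB t c).2.2 = false →
      (pvScanB t c).1 = t ∧ (pvScanB t c).2.1 = c ∧ pvNoAdj t := by
  intro t c
  fun_induction pvScanB t c with
  | case1 a b rest c hab ih => intro h; simp_all
  | case2 a b rest c h1 hab ih => intro h; simp_all
  | case3 a b rest c h1 h2 hab ih => intro h; simp_all
  | case4 a b rest c h1 h2 h3 hab ih => intro h; simp_all
  | case5 a b rest c h1 h2 h3 h4 ih =>
    intro h
    obtain ⟨e1, e2, e3⟩ := ih h
    refine ⟨by rw [e1], e2, ?_, e3⟩
    unfold pvIsPairP
    tauto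
  | case6 t c h =>
    intro _
    refine ⟨rfl, rfl, ?_⟩
    cases t with
    | nil => trivial
    | cons a t2 =>
      cases t2 with
      | nil => trivial
      | cons b r => exact (h a b r rfl).elim

-- the reduction loop preserves pvRun and ends on a pair-free residue
theorem reduce_run : ∀ (t : List Char) (c : Int × Int × Int × Int),
    ∃ δ, (pvReduceB t c).2 = pvCAdd c δ ∧ pvNoAdj (pvReduceB t c).1 ∧
      ∀ st, pvRun t st =
        (pvRun (pvReduceB t c).1 st).map (fun q => (q.1, pvCAdd δ q.2)) := by
  intro t c
  fun_induction pvReduceB t c with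
  | case1 t c hcond ih =>
    obtain ⟨δ1, hδ1, hrun1⟩ := scan_run t c
    obtain ⟨δ2, hδ2, hna, hrun2⟩ := ih
    refine ⟨pvCAdd δ1 δ2, ?_, hna, ?_⟩
    · rw [hδ2, hδ1, cadd_assoc]
    · intro st
      rw [hrun1 st, hrun2 st]
      cases pvRun (pvReduceB (pvScanB t c).1 (pvScanB t c).2.1).1 st <;>
        simp [pvCAdd, Prod.ext_iff] <;> omega
  | case2 t c hcond =>
    obtain ⟨e1, e2, e3⟩ := scan_false t c (by simpa using hcond)
    refine ⟨(0, 0, 0, 0), by simp [e2, pvCAdd], by simpa [e1] using e3, ?_⟩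
    intro st
    rw [e1]
    cases pvRun t st <;> simp [pvCAdd]

-- on a pair-free word the stack never shrinks back to empty
theorem irr_aux : ∀ (t : List Char) (prev : Char) (st : List Char)
    (q : List Char × (Int × Int × Int × Int)), pvNoAdj (prev :: t) →
    pvRun t (prev :: st) = some q → q.1 ≠ [] := by
  intro t
  induction t with
  | nil =>
    intro prev st q _ hq
    simp [pvRun] at hq
    rw [← hq]
    simp
  | cons ch rest ih =>
    intro prev st q hna hq
    rcases hna with ⟨hnp, hna'⟩
    cases hp : pvPOf ch with
    | none =>
      rw [show pvRun (ch :: rest) (prev :: st) = pvRun rest (ch :: prev :: st) by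
        simp [pvRun, hp]] at hq
      exact ih ch (prev :: st) q hna' hq
    | some p =>
      by_cases hpp : prev = p
      · exfalso
        apply hnp
        subst hpp
        unfold pvPOf at hp
        unfold pvIsPairP
        split_ifs at hp <;> simp_all [eq_comm]
      · rw [show pvRun (ch :: rest) (prev :: st) = none by
          simp [pvRun, hp, hpp]] at hq
        exact absurd hq (by simp)

theorem irr_run (t : List Char) (ht : t ≠ []) (hna : pvNoAdj t)
    (q : List Char × (Int × Int × Int × Int)) (hq : pvRun t [] = some q) : q.1 ≠ [] := by
  cases t with
  | nil => exact absurd rfl ht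
  | cons ch rest =>
    cases hp : pvPOf ch with
    | none =>
      rw [show pvRun (ch :: rest) [] = pvRun rest [ch] by simp [pvRun, hp]] at hq
      cases rest with
      | nil =>
        simp [pvRun] at hq
        rw [← hq]
        simp
      | cons b r2 => exact irr_aux _ ch [] q hna hq
    | some p =>
      rw [show pvRun (ch :: rest) [] = none by simp [pvRun, hp]] at hq
      exact absurd hq (by simp)

theorem mkC_values (a b c d : Int) : (mkC a b c d).values = [a, b, c, d] := rfl

theorem final_eq (a b c d n : Int) :
    pvFinalA [a, b, c, d] n = if a < n ∨ b < n ∨ c < n ∨ d < n then "No" else "Yes" := by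
  simp only [pvFinalA]
  split_ifs <;> tauto

-- the two outer loops agree, counts related by mkC
theorem outer_eq : ∀ (arr : List String) (a b c d : Int),
    pvOuterA arr (mkC a b c d) =
      (pvOuterB arr (a, b, c, d)).map (fun q => mkC q.1 q.2.1 q.2.2.1 q.2.2.2) := by
  intro arr
  induction arr with
  | nil => intro a b c d; rfl
  | cons s rest ih =>
    intro a b c d
    obtain ⟨δ, hδ, hna, hrun⟩ := reduce_run s.toList (a, b, c, d)
    simp only [pvOuterA, pvOuterB, bridgeA, hrun []]
    by_cases hres : (pvReduceB s.toList (a, b, c, d)).1 = []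
    · rw [hres]
      simp only [pvRun, Option.map_some]
      have h2 : (pvReduceB s.toList (a, b, c, d)).2 =
          (a + δ.1, b + δ.2.1, c + δ.2.2.1, d + δ.2.2.2) := by
        rw [hδ]; rfl
      rw [h2, ih]
      have h3 : pvCAdd δ (0, 0, 0, 0) = δ := cadd_zero δ
      rw [h3]
      simp
    · cases hq : pvRun (pvReduceB s.toList (a, b, c, d)).1 [] with
      | none => simp [hres]
      | some q =>
        have hne : q.1 ≠ [] := irr_run _ hres hna q hq
        simp [hres, hne]

-- ===== VERDICT (by name: the statement is the Claim_ definition above) =====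
theorem complex_bracket_sequence_spec : Claim_equal_complex_bracket_sequence := by
  intro arr n _
  unfold Spec_complex_bracket_sequence
  unfold complex_bracket_sequence complex_bracket_sequence_alt
  have h0 : pvCounts0A = mkC 0 0 0 0 := rfl
  rw [h0, outer_eq]
  cases hob : pvOuterB arr (0, 0, 0, 0) with
  | none => rfl
  | some q =>
    obtain ⟨p, q2, r, t⟩ := q
    simp only [Option.map_some]
    rw [mkC_values, final_eq]
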